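-- pv_equiv track=rewrite | github.com/mariodac/Geometria-Analitica-e-Algebra-Linear | Versao_2019/exerciciosCap2.py | vetorCombinacaoSomatorio
-- ===== SOURCE A (Python) =====
-- def vetorCombinacaoSomatorio(vetorU, alpha):
--     vetorCombinacao = list()
--     for i in range(0, len(vetorU)): vetorCombinacao.append(0)
--     count = 0
--     while count <= alpha-1:
--         for i in range(0, len(vetorU)):
--             vetorCombinacao[i] += count * vetorU[i]
--         count += 1
--
--     return vetorCombinacao
-- ===== SOURCE B (Python) =====
-- def vetorCombinacaoSomatorio(vetorU, alpha):
--     s = alpha * (alpha - 1) // 2 if alpha > 0 else 0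
--     return [s * x for x in vetorU]
-- ===== Notes on version B (the rewrite author's own statement) =====
-- stated objective: faster
-- what changed: Replaces the count-loop of alpha passes over the vector with the closed-form triangular number s = alpha*(alpha-1)//2 (0 if alpha <= 0) and a single map multiplying each element by s.
import Mathlib
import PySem

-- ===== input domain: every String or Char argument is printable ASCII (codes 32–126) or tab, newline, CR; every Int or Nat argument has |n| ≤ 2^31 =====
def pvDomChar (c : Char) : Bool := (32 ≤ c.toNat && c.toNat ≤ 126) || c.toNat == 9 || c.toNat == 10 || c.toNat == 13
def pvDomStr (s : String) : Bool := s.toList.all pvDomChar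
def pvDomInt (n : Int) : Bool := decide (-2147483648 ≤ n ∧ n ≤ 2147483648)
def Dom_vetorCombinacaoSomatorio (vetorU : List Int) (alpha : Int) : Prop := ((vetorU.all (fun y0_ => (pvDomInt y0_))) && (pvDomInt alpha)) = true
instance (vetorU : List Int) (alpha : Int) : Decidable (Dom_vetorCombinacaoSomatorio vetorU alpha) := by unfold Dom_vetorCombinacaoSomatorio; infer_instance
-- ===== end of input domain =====

-- B replaces A's alpha passes over the vector with the closed-form triangular
-- number s = alpha*(alpha-1)//2 and a single map (objective: faster).

-- ===== PORT A =====
-- inner 'for i in range(0, len(vetorU)): vetorCombinacao[i] += count * vetorU[i]'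
def vcsInner (count : Int) : List Int → List Int → List Int
  | c :: cs, x :: xs => (c + count * x) :: vcsInner count cs xs
  | cs, _ => cs

-- the 'while count <= alpha-1' loop, state = (vetorCombinacao, count)
def vcsLoop (v u : List Int) (count alpha : Int) : List Int :=
  if count ≤ alpha - 1 then vcsLoop (vcsInner count v u) u (count + 1) alpha else v
termination_by (alpha - count).toNat
decreasing_by omega

def vetorCombinacaoSomatorio (vetorU : List Int) (alpha : Int) : List Int :=
  -- 'for i in range(0, len(vetorU)): vetorCombinacao.append(0)'
  let vetorCombinacao := vetorU.map (fun _ => (0 : Int))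
  vcsLoop vetorCombinacao vetorU 0 alpha

-- ===== PORT B =====
def vetorCombinacaoSomatorio_alt (vetorU : List Int) (alpha : Int) : List Int :=
  let s : Int := if alpha > 0 then PySem.Int.floordiv (alpha * (alpha - 1)) 2 else 0
  vetorU.map (fun x => s * x)

-- ===== PRECONDITION & SPEC =====
def Spec_vetorCombinacaoSomatorio (vetorU : List Int) (alpha : Int) (out : List Int) : Prop := out = vetorCombinacaoSomatorio_alt vetorU alpha
instance (vetorU : List Int) (alpha : Int) (out : List Int) : Decidable (Spec_vetorCombinacaoSomatorio vetorU alpha out) := by unfold Spec_vetorCombinacaoSomatorio; infer_instance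

-- ===== CLAIM (what is proved, stated in full; the proofs are below) =====
def Claim_equal_vetorCombinacaoSomatorio : Prop := ∀ (vetorU : List Int) (alpha : Int), Dom_vetorCombinacaoSomatorio vetorU alpha → Spec_vetorCombinacaoSomatorio vetorU alpha (vetorCombinacaoSomatorio vetorU alpha)

-- ===== LEMMAS AND PROOFS =====

-- the sum 'count + (count+1) + … + (alpha-1)' accumulated by the while loop
def vcsSum (count alpha : Int) : Int :=
  if count ≤ alpha - 1 then count + vcsSum (count + 1) alpha else 0
termination_by (alpha - count).toNat
decreasing_by omega

theorem vcsInner_vcsInner (a b : Int) (v u : List Int) :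
    vcsInner a (vcsInner b v u) u = vcsInner (a + b) v u := by
  induction v generalizing u with
  | nil => cases u <;> simp [vcsInner]
  | cons c cs ih =>
    cases u with
    | nil => simp [vcsInner]
    | cons x xs => simp [vcsInner, ih]; ring

theorem vcsInner_zero (v u : List Int) : vcsInner 0 v u = v := by
  induction v generalizing u with
  | nil => cases u <;> simp [vcsInner]
  | cons c cs ih =>
    cases u with
    | nil => simp [vcsInner]
    | cons x xs => simp [vcsInner, ih]

theorem vcsLoop_eq (v u : List Int) (count alpha : Int) :
    vcsLoop v u count alpha = vcsInner (vcsSum count alpha) v u := by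
  fun_induction vcsLoop v u count alpha with
  | case1 v count h ih =>
    rw [ih, vcsInner_vcsInner]
    conv_rhs => rw [vcsSum]
    rw [if_pos h, Int.add_comm]
  | case2 v count h =>
    rw [vcsSum, if_neg h, vcsInner_zero]

theorem two_mul_vcsSum (count alpha : Int) (h : count ≤ alpha) :
    2 * vcsSum count alpha = alpha * (alpha - 1) - count * (count - 1) := by
  fun_induction vcsSum count alpha with
  | case1 count hle ih =>
    have := ih (by omega)
    ring_nf
    ring_nf at this
    omega
  | case2 count hle =>
    have : count = alpha := by omega
    subst this
    ring_nf

theorem vcsInner_zeros (s : Int) (u : List Int) :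
    vcsInner s (u.map (fun _ => (0 : Int))) u = u.map (fun x => s * x) := by
  induction u with
  | nil => simp [vcsInner]
  | cons x xs ih => simp only [List.map, vcsInner, ih]; simp

theorem vcsSum_zero (alpha : Int) :
    vcsSum 0 alpha = if alpha > 0 then PySem.Int.floordiv (alpha * (alpha - 1)) 2 else 0 := by
  by_cases hpos : alpha > 0
  · have h2 : 2 * vcsSum 0 alpha = alpha * (alpha - 1) - 0 * (0 - 1) :=
      two_mul_vcsSum 0 alpha (by omega)
    rw [if_pos hpos, PySem.Int.floordiv_eq_ediv_of_pos (by omega)]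
    omega
  · rw [if_neg hpos, vcsSum, if_neg (by omega)]

-- ===== VERDICT (by name: the statement is the Claim_ definition above) =====
theorem vetorCombinacaoSomatorio_spec : Claim_equal_vetorCombinacaoSomatorio := by
  intro vetorU alpha _
  unfold Spec_vetorCombinacaoSomatorio
  unfold vetorCombinacaoSomatorio vetorCombinacaoSomatorio_alt
  rw [vcsLoop_eq, vcsSum_zero, vcsInner_zeros]
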